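-- pv_equiv track=rewrite | github.com/ahmrafi22/BracU-Codes | CSE 221 [2023]/week4/task6.py | max_diamonds
-- ===== SOURCE A (Python) =====
-- def max_diamonds(grid):
--     def dfs(x, y, diamonds_collected):
--         # Check if the current position is out of bounds or an obstacle
--         if not (0 <= x < rows) or not (0 <= y < cols) or grid[x][y] == '#':
--             return diamonds_collected
--
--         # Check if the current cell contains a diamond
--         if grid[x][y] == 'D':
--             diamonds_collected += 1
--
--         # Mark the current cell as visited
--         grid[x][y] = '#'
--
--         # Explore all possible moves (up, down, left, right)
--         diamonds_collected = dfs(x + 1, y, diamonds_collected)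
--         diamonds_collected = dfs(x - 1, y, diamonds_collected)
--         diamonds_collected = dfs(x, y + 1, diamonds_collected)
--         diamonds_collected = dfs(x, y - 1, diamonds_collected)
--
--         return diamonds_collected
--
--     rows, cols = len(grid), len(grid[0])
--     max_diamonds_collected = 0
--
--     # Find the starting position
--     for i in range(rows):
--         for j in range(cols):
--             if grid[i][j] == '.':
--                 max_diamonds_collected = max(max_diamonds_collected, dfs(i, j, 0))
--
--     return max_diamonds_collected
-- ===== SOURCE B (Python) =====
-- def max_diamonds(grid):
--     # Works on a flat 1-D copy of the grid (row-major); does NOT mutate the caller's grid.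
--     rows, cols = len(grid), len(grid[0])
--     cells = [grid[i][j] for i in range(rows) for j in range(cols)]
--     size = rows * cols
--     best = 0
--     for start in range(size):
--         if cells[start] == '.':
--             count = 0
--             stack = [start]
--             while stack:
--                 k = stack.pop()
--                 if cells[k] == '#':
--                     continue
--                 if cells[k] == 'D':
--                     count += 1
--                 cells[k] = '#'
--                 if k % cols > 0:
--                     stack.append(k - 1)
--                 if k % cols < cols - 1:
--                     stack.append(k + 1)
--                 if k >= cols:
--                     stack.append(k - cols)
--                 if k + cols < size:
--                     stack.append(k + cols)
--             best = max(best, count)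
--     return best
-- ===== Notes on version B (the rewrite author's own statement) =====
-- stated objective: alternative
-- what changed: A's recursive four-way DFS on the nested 2-D grid (mutated in place) is replaced by an iterative flood fill with an explicit stack over a flat row-major 1-D copy of the grid: one loop over flat indices, neighbours via k±1/k±cols with boundary guards at push time, so B never recurses and never mutates the caller's grid.
import Mathlib
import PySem

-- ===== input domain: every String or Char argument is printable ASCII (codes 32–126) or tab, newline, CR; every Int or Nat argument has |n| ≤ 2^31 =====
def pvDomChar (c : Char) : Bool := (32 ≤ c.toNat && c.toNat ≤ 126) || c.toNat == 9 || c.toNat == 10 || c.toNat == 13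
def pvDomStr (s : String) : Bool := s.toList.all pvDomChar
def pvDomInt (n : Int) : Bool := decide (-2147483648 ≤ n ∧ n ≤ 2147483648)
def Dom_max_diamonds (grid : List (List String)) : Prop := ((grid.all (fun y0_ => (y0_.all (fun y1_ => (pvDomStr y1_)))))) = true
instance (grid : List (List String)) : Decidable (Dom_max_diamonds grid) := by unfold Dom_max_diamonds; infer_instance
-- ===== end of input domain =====

-- B replaces A's recursive four-way DFS on the nested grid with an iterative explicit-stack
-- flood fill over a flat row-major 1-D copy of the grid (neighbours k±1 / k±cols with
-- push-time boundary guards); equal return values — unlike A, the Python B does not mutate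
-- the caller's grid, so the equivalence proved here is about the return value.


-- ===== PORT A =====
-- grid[x][y] (read only after the bounds checks succeed; the default is never used on
-- inputs satisfying Pre_)
def pvCellD (g : List (List String)) (x y : Int) : String :=
  (g.getD x.toNat []).getD y.toNat ""

-- grid[x][y] = v (Python list assignment; in bounds whenever executed under Pre_)
def pvSetCell (g : List (List String)) (x y : Int) (v : String) : List (List String) :=
  g.set x.toNat ((g.getD x.toNat []).set y.toNat v)

def pvRowCount (r : List String) : Nat := (r.filter (fun s => s != "#")).length

-- number of non-'#' cells; used only to size the totality fuel of the loops
def pvNonHash (g : List (List String)) : Nat := (g.map pvRowCount).sum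

-- A's recursive dfs, threading the mutated grid and the running count; fuel is a pure
-- totality guard (each call site passes provably sufficient fuel, see the stability lemmas)
def pvDfsA (fuel : Nat) (rows cols : Int) (g : List (List String)) (x y : Int) (c : Int) :
    List (List String) × Int :=
  match fuel with
  | 0 => (g, c)
  | fuel + 1 =>
    if x < 0 ∨ rows ≤ x ∨ y < 0 ∨ cols ≤ y ∨ pvCellD g x y = "#" then (g, c)
    else
      let c1 := if pvCellD g x y = "D" then c + 1 else c
      let g1 := pvSetCell g x y "#"
      let r1 := pvDfsA fuel rows cols g1 (x + 1) y c1
      let r2 := pvDfsA fuel rows cols r1.1 (x - 1) y r1.2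
      let r3 := pvDfsA fuel rows cols r2.1 x (y + 1) r2.2
      pvDfsA fuel rows cols r3.1 x (y - 1) r3.2

def max_diamonds (grid : List (List String)) : Int :=
  let rows : Int := grid.length
  let cols : Int := (grid.headD []).length
  ((PySem.List.pyRange 0 rows 1).foldl (fun st i =>
      (PySem.List.pyRange 0 cols 1).foldl (fun st j =>
        if pvCellD st.1 i j = "." then
          let r := pvDfsA (pvNonHash st.1 + 1) rows cols st.1 i j 0
          (r.1, max st.2 r.2)
        else st) st) ((grid, 0) : List (List String) × Int)).2

-- ===== PORT B =====
-- number of non-'#' entries of the flat copy; sizes the totality fuel of the while loop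
def pvFlatLive (cells : List String) : Nat := (cells.filter (fun s => s != "#")).length

-- B's while loop over the explicit stack of flat indices; the Lean list head is the Python
-- stack top (the END of the Python list), so the four guarded appends become the guarded
-- conses s1..s4 (last append = outermost cons).  cells[k] is read/assigned via getD/set at
-- k.toNat, exact here because every pushed index satisfies 0 ≤ k < size = len(cells).
-- fuel is a pure totality guard (the call site passes provably sufficient fuel).
def pvFloodFlat (fuel : Nat) (cols size : Int) (cells : List String)
    (stack : List Int) (c : Int) : List String × Int :=
  match fuel, stack with
  | _, [] => (cells, c)
  | 0, _ :: _ => (cells, c)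
  | fuel + 1, k :: rest =>
    if cells.getD k.toNat "" = "#" then pvFloodFlat fuel cols size cells rest c
    else
      let c1 := if cells.getD k.toNat "" = "D" then c + 1 else c
      let cells1 := cells.set k.toNat "#"
      let s1 := if 0 < PySem.Int.mod k cols then (k - 1) :: rest else rest
      let s2 := if PySem.Int.mod k cols < cols - 1 then (k + 1) :: s1 else s1
      let s3 := if cols ≤ k then (k - cols) :: s2 else s2
      let s4 := if k + cols < size then (k + cols) :: s3 else s3
      pvFloodFlat fuel cols size cells1 s4 c1

def max_diamonds_alt (grid : List (List String)) : Int :=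
  let rows : Int := grid.length
  let cols : Int := (grid.headD []).length
  -- cells = [grid[i][j] for i in range(rows) for j in range(cols)] (indices in range under Pre_)
  let cells : List String :=
    (PySem.List.pyRange 0 rows 1).flatMap (fun i =>
      (PySem.List.pyRange 0 cols 1).map (fun j => (grid.getD i.toNat []).getD j.toNat ""))
  let size : Int := rows * cols
  ((PySem.List.pyRange 0 size 1).foldl (fun st start =>
      if st.1.getD start.toNat "" = "." then
        let r := pvFloodFlat (4 * pvFlatLive st.1 + 1) cols size st.1 [start] 0
        (r.1, max st.2 r.2)
      else st) ((cells, 0) : List String × Int)).2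

-- ===== PRECONDITION & SPEC =====
-- Pre_ excludes exactly the inputs on which Python A raises IndexError: the empty grid
-- (len(grid[0])) and any grid with a row shorter than row 0 (the outer loop reads
-- grid[i][j] for every i and every j < len(grid[0])).
def Pre_max_diamonds (grid : List (List String)) : Prop :=
  grid ≠ [] ∧ ∀ row ∈ grid, (grid.headD []).length ≤ row.length
instance (grid : List (List String)) : Decidable (Pre_max_diamonds grid) := by
  unfold Pre_max_diamonds; infer_instance

def pvWitness_max_diamonds : List (List String) := [[".", "D"], ["#", "."]]

def Spec_max_diamonds (grid : List (List String)) (out : Int) : Prop := out = max_diamonds_alt grid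
instance (grid : List (List String)) (out : Int) : Decidable (Spec_max_diamonds grid out) := by
  unfold Spec_max_diamonds; infer_instance

-- ===== CLAIM (what is proved, stated in full; the proofs are below) =====
def Claim_equal_max_diamonds : Prop := ∀ (grid : List (List String)), Dom_max_diamonds grid → Pre_max_diamonds grid → Spec_max_diamonds grid (max_diamonds grid)

-- ===== LEMMAS AND PROOFS =====

-- shape invariant carried through the loops: exact row count, every row at least cols wide
def pvShape (rows cols : Int) (g : List (List String)) : Prop :=
  (g.length : Int) = rows ∧ ∀ row ∈ g, cols ≤ (row.length : Int)

-- one dfs call with canonical (always-sufficient) fuel, as a fold step over start cells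
def pvStep (rows cols : Int) (s : List (List String) × Int) (p : Int × Int) :
    List (List String) × Int :=
  pvDfsA (pvNonHash s.1 + 1) rows cols s.1 p.1 p.2 s.2

-- flat row-major truncation of the nested grid (each row cut to cols entries)
def pvTrunc (colsN : Nat) (g : List (List String)) : List String :=
  (g.map (fun r => r.take colsN)).flatten

theorem pvRowCount_set_le (r : List String) (j : Nat) :
    pvRowCount (r.set j "#") ≤ pvRowCount r := by
  induction r generalizing j with
  | nil => simp [pvRowCount]
  | cons a t ih =>
    cases j with
    | zero =>
      simp only [List.set_cons_zero, pvRowCount, List.filter_cons]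
      split <;> split <;> simp_all
    | succ j =>
      simp only [List.set_cons_succ, pvRowCount, List.filter_cons]
      have := ih j
      simp only [pvRowCount] at this
      split <;> simpa using this

theorem pvRowCount_set_eq (r : List String) (j : Nat) (hj : j < r.length)
    (h : r.getD j "" ≠ "#") : pvRowCount (r.set j "#") + 1 = pvRowCount r := by
  induction r generalizing j with
  | nil => simp at hj
  | cons a t ih =>
    cases j with
    | zero =>
      simp only [List.getD_cons_zero] at h
      simp only [List.set_cons_zero, pvRowCount, List.filter_cons]
      simp [h]
    | succ j =>
      simp only [List.getD_cons_succ] at h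
      simp only [List.length_cons, Nat.succ_lt_succ_iff] at hj
      have := ih j hj h
      simp only [List.set_cons_succ, pvRowCount, List.filter_cons] at this ⊢
      split <;> first | omega | (simp only [List.length_cons]; omega)

theorem pvNonHash_set_le' (g : List (List String)) (i j : Nat) :
    pvNonHash (g.set i ((g.getD i []).set j "#")) ≤ pvNonHash g := by
  induction g generalizing i with
  | nil => simp [pvNonHash]
  | cons r t ih =>
    cases i with
    | zero =>
      simp only [List.set_cons_zero, List.getD_cons_zero, pvNonHash, List.map_cons, List.sum_cons]
      have := pvRowCount_set_le r j
      simp only [pvNonHash] at *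
      omega
    | succ i =>
      simp only [List.set_cons_succ, List.getD_cons_succ, pvNonHash, List.map_cons, List.sum_cons]
      have := ih i
      simp only [pvNonHash] at this
      omega

theorem pvNonHash_set_le (g : List (List String)) (x y : Int) :
    pvNonHash (pvSetCell g x y "#") ≤ pvNonHash g :=
  pvNonHash_set_le' g x.toNat y.toNat

theorem pvNonHash_set_eq' (g : List (List String)) (i j : Nat)
    (hx : i < g.length) (hy : j < (g.getD i []).length)
    (h : (g.getD i []).getD j "" ≠ "#") :
    pvNonHash (g.set i ((g.getD i []).set j "#")) + 1 = pvNonHash g := by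
  induction g generalizing i with
  | nil => simp at hx
  | cons r t ih =>
    cases i with
    | zero =>
      simp only [List.getD_cons_zero] at hy h
      simp only [List.set_cons_zero, List.getD_cons_zero, pvNonHash, List.map_cons, List.sum_cons]
      have := pvRowCount_set_eq r j hy h
      omega
    | succ i =>
      simp only [List.getD_cons_succ] at hy h
      simp only [List.length_cons, Nat.succ_lt_succ_iff] at hx
      have := ih i hx hy h
      simp only [List.set_cons_succ, List.getD_cons_succ, pvNonHash, List.map_cons, List.sum_cons] at this ⊢
      omega

theorem pvNonHash_set_eq (g : List (List String)) (x y : Int)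
    (hx : x.toNat < g.length) (hy : y.toNat < (g.getD x.toNat []).length)
    (h : pvCellD g x y ≠ "#") :
    pvNonHash (pvSetCell g x y "#") + 1 = pvNonHash g :=
  pvNonHash_set_eq' g x.toNat y.toNat hx hy h

theorem pvMapLen_set (g : List (List String)) (x y : Int) (v : String) :
    (pvSetCell g x y v).map List.length = g.map List.length := by
  unfold pvSetCell
  induction g generalizing x with
  | nil => simp
  | cons r t ih =>
    rcases Nat.eq_zero_or_pos x.toNat with h0 | hpos
    · simp [h0]
    · obtain ⟨i, hi⟩ : ∃ i, x.toNat = i + 1 := ⟨x.toNat - 1, by omega⟩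
      have := ih (x := (i : Int))
      simp only [hi, List.set_cons_succ, List.getD_cons_succ, List.map_cons, List.cons.injEq]
      refine ⟨trivial, ?_⟩
      simpa using this

theorem pvShape_of_mapLen {rows cols : Int} {g g' : List (List String)}
    (h : g'.map List.length = g.map List.length) (hs : pvShape rows cols g) :
    pvShape rows cols g' := by
  have hlen : g'.length = g.length := by
    have := congrArg List.length h
    simpa using this
  constructor
  · rw [hlen]; exact hs.1
  · intro row hrow
    obtain ⟨k, hk, hkr⟩ := List.mem_iff_getElem.mp hrow
    have hk2 : k < (g'.map List.length).length := by simpa using hk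
    have hk3 : k < (g.map List.length).length := by simpa [hlen] using hk
    have h1 : (g'.map List.length)[k]'hk2 = (g.map List.length)[k]'hk3 := by
      simp only [h]
    simp only [List.getElem_map] at h1
    rw [← hkr]
    rw [h1]
    exact hs.2 _ (List.getElem_mem _)

theorem pvDfsA_mapLen (fuel : Nat) (rows cols : Int) :
    ∀ (g : List (List String)) (x y c : Int),
    (pvDfsA fuel rows cols g x y c).1.map List.length = g.map List.length ∧
    pvNonHash (pvDfsA fuel rows cols g x y c).1 ≤ pvNonHash g := by
  induction fuel with
  | zero => intro g x y c; simp [pvDfsA]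
  | succ fuel ih =>
    intro g x y c
    simp only [pvDfsA]
    split
    · simp
    · have hset : (pvSetCell g x y "#").map List.length = g.map List.length := pvMapLen_set ..
      have hsetn : pvNonHash (pvSetCell g x y "#") ≤ pvNonHash g := pvNonHash_set_le ..
      set P := fun (g' : List (List String)) => g'.map List.length = g.map List.length ∧ pvNonHash g' ≤ pvNonHash g with hP
      have hP1 : P (pvSetCell g x y "#") := ⟨hset, hsetn⟩
      have step : ∀ (g' : List (List String)) (x' y' c' : Int), P g' →
          P (pvDfsA fuel rows cols g' x' y' c').1 := by
        intro g' x' y' c' hp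
        exact ⟨(ih g' x' y' c').1.trans hp.1, (ih g' x' y' c').2.trans hp.2⟩
      exact step _ _ _ _ (step _ _ _ _ (step _ _ _ _ (step _ _ _ _ hP1)))

theorem pvShape_set {rows cols : Int} {g : List (List String)} (x y : Int) (v : String)
    (hs : pvShape rows cols g) : pvShape rows cols (pvSetCell g x y v) :=
  pvShape_of_mapLen (pvMapLen_set g x y v) hs

theorem pvShape_dfsA {rows cols : Int} (fuel : Nat) {g : List (List String)} (x y c : Int)
    (hs : pvShape rows cols g) : pvShape rows cols (pvDfsA fuel rows cols g x y c).1 :=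
  pvShape_of_mapLen (pvDfsA_mapLen fuel rows cols g x y c).1 hs

theorem pvInRange {rows cols : Int} {g : List (List String)} {x y : Int}
    (hs : pvShape rows cols g)
    (hng : ¬(x < 0 ∨ rows ≤ x ∨ y < 0 ∨ cols ≤ y ∨ pvCellD g x y = "#")) :
    x.toNat < g.length ∧ y.toNat < (g.getD x.toNat []).length := by
  push Not at hng
  obtain ⟨hx0, hxr, hy0, hyc, _⟩ := hng
  have hxg : x.toNat < g.length := by
    have := hs.1
    omega
  refine ⟨hxg, ?_⟩
  have hmem : g.getD x.toNat [] ∈ g := by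
    rw [List.getD_eq_getElem g [] hxg]
    exact List.getElem_mem _
  have := hs.2 _ hmem
  omega

theorem pvNonHash_mark {rows cols : Int} {g : List (List String)} {x y : Int}
    (hs : pvShape rows cols g)
    (hng : ¬(x < 0 ∨ rows ≤ x ∨ y < 0 ∨ cols ≤ y ∨ pvCellD g x y = "#")) :
    pvNonHash (pvSetCell g x y "#") + 1 = pvNonHash g := by
  obtain ⟨h1, h2⟩ := pvInRange hs hng
  push Not at hng
  exact pvNonHash_set_eq g x y h1 h2 hng.2.2.2.2

theorem pvDfsA_stable (rows cols : Int) :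
    ∀ (f : Nat) (g : List (List String)) (x y c : Int), pvShape rows cols g →
      pvNonHash g < f →
      pvDfsA f rows cols g x y c = pvDfsA (pvNonHash g + 1) rows cols g x y c := by
  intro f
  induction f using Nat.strong_induction_on with
  | _ f ih =>
  intro g x y c hs hf
  match f with
  | 0 => exact absurd hf (Nat.not_lt_zero _)
  | f + 1 =>
    simp only [pvDfsA]
    split
    · rfl
    · rename_i hng
      have hmark := pvNonHash_mark hs hng
      set c1 := if pvCellD g x y = "D" then c + 1 else c with hc1
      set g1 := pvSetCell g x y "#" with hg1
      have hs1 : pvShape rows cols g1 := pvShape_set x y "#" hs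
      have hn1 : pvNonHash g1 + 1 = pvNonHash g := hmark
      have e1L : pvDfsA f rows cols g1 (x + 1) y c1 = pvDfsA (pvNonHash g1 + 1) rows cols g1 (x + 1) y c1 :=
        ih f (by omega) g1 (x + 1) y c1 hs1 (by omega)
      have e1R : pvDfsA (pvNonHash g) rows cols g1 (x + 1) y c1 = pvDfsA (pvNonHash g1 + 1) rows cols g1 (x + 1) y c1 :=
        ih (pvNonHash g) (by omega) g1 (x + 1) y c1 hs1 (by omega)
      set r1 := pvDfsA (pvNonHash g1 + 1) rows cols g1 (x + 1) y c1 with hr1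
      have hs2 : pvShape rows cols r1.1 := pvShape_dfsA _ _ _ _ hs1
      have hn2 : pvNonHash r1.1 ≤ pvNonHash g1 := (pvDfsA_mapLen _ rows cols g1 (x + 1) y c1).2
      have e2L : pvDfsA f rows cols r1.1 (x - 1) y r1.2 = pvDfsA (pvNonHash r1.1 + 1) rows cols r1.1 (x - 1) y r1.2 :=
        ih f (by omega) _ _ _ _ hs2 (by omega)
      have e2R : pvDfsA (pvNonHash g) rows cols r1.1 (x - 1) y r1.2 = pvDfsA (pvNonHash r1.1 + 1) rows cols r1.1 (x - 1) y r1.2 :=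
        ih (pvNonHash g) (by omega) _ _ _ _ hs2 (by omega)
      set r2 := pvDfsA (pvNonHash r1.1 + 1) rows cols r1.1 (x - 1) y r1.2 with hr2
      have hs3 : pvShape rows cols r2.1 := pvShape_dfsA _ _ _ _ hs2
      have hn3 : pvNonHash r2.1 ≤ pvNonHash r1.1 := (pvDfsA_mapLen _ rows cols r1.1 (x - 1) y r1.2).2
      have e3L : pvDfsA f rows cols r2.1 x (y + 1) r2.2 = pvDfsA (pvNonHash r2.1 + 1) rows cols r2.1 x (y + 1) r2.2 :=
        ih f (by omega) _ _ _ _ hs3 (by omega)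
      have e3R : pvDfsA (pvNonHash g) rows cols r2.1 x (y + 1) r2.2 = pvDfsA (pvNonHash r2.1 + 1) rows cols r2.1 x (y + 1) r2.2 :=
        ih (pvNonHash g) (by omega) _ _ _ _ hs3 (by omega)
      set r3 := pvDfsA (pvNonHash r2.1 + 1) rows cols r2.1 x (y + 1) r2.2 with hr3
      have hs4 : pvShape rows cols r3.1 := pvShape_dfsA _ _ _ _ hs3
      have hn4 : pvNonHash r3.1 ≤ pvNonHash r2.1 := (pvDfsA_mapLen _ rows cols r2.1 x (y + 1) r2.2).2
      have e4L : pvDfsA f rows cols r3.1 x (y - 1) r3.2 = pvDfsA (pvNonHash r3.1 + 1) rows cols r3.1 x (y - 1) r3.2 :=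
        ih f (by omega) _ _ _ _ hs4 (by omega)
      have e4R : pvDfsA (pvNonHash g) rows cols r3.1 x (y - 1) r3.2 = pvDfsA (pvNonHash r3.1 + 1) rows cols r3.1 x (y - 1) r3.2 :=
        ih (pvNonHash g) (by omega) _ _ _ _ hs4 (by omega)
      rw [e1L, e1R, e2L, e2R, e3L, e3R, e4L, e4R]

theorem pvStep_unfold (rows cols : Int) (g : List (List String)) (x y c : Int)
    (hs : pvShape rows cols g) :
    pvStep rows cols (g, c) (x, y) =
      if x < 0 ∨ rows ≤ x ∨ y < 0 ∨ cols ≤ y ∨ pvCellD g x y = "#" then (g, c)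
      else
        pvStep rows cols (pvStep rows cols (pvStep rows cols (pvStep rows cols
          (pvSetCell g x y "#", if pvCellD g x y = "D" then c + 1 else c)
          (x + 1, y)) (x - 1, y)) (x, y + 1)) (x, y - 1) := by
  simp only [pvStep]
  conv_lhs => simp only [pvDfsA]
  split
  · rfl
  · rename_i hng
    have hmark := pvNonHash_mark hs hng
    set c1 := if pvCellD g x y = "D" then c + 1 else c with hc1
    set g1 := pvSetCell g x y "#" with hg1
    have hs1 : pvShape rows cols g1 := pvShape_set x y "#" hs
    rw [pvDfsA_stable rows cols (pvNonHash g) g1 (x + 1) y c1 hs1 (by omega)]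
    set r1 := pvDfsA (pvNonHash g1 + 1) rows cols g1 (x + 1) y c1 with hr1
    have hs2 : pvShape rows cols r1.1 := pvShape_dfsA _ _ _ _ hs1
    have hn2 : pvNonHash r1.1 ≤ pvNonHash g1 := (pvDfsA_mapLen _ rows cols g1 (x + 1) y c1).2
    rw [pvDfsA_stable rows cols (pvNonHash g) r1.1 (x - 1) y r1.2 hs2 (by omega)]
    set r2 := pvDfsA (pvNonHash r1.1 + 1) rows cols r1.1 (x - 1) y r1.2 with hr2
    have hs3 : pvShape rows cols r2.1 := pvShape_dfsA _ _ _ _ hs2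
    have hn3 : pvNonHash r2.1 ≤ pvNonHash r1.1 := (pvDfsA_mapLen _ rows cols r1.1 (x - 1) y r1.2).2
    rw [pvDfsA_stable rows cols (pvNonHash g) r2.1 x (y + 1) r2.2 hs3 (by omega)]
    set r3 := pvDfsA (pvNonHash r2.1 + 1) rows cols r2.1 x (y + 1) r2.2 with hr3
    have hs4 : pvShape rows cols r3.1 := pvShape_dfsA _ _ _ _ hs3
    have hn4 : pvNonHash r3.1 ≤ pvNonHash r2.1 := (pvDfsA_mapLen _ rows cols r2.1 x (y + 1) r2.2).2
    rw [pvDfsA_stable rows cols (pvNonHash g) r3.1 x (y - 1) r3.2 hs4 (by omega)]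

-- pvStep at an out-of-bounds coordinate is the identity (no shape hypothesis needed)
theorem pvStep_oob {rows cols : Int} (s : List (List String) × Int) {x y : Int}
    (h : x < 0 ∨ rows ≤ x ∨ y < 0 ∨ cols ≤ y) :
    pvStep rows cols s (x, y) = s := by
  cases s with
  | mk g c =>
    simp only [pvStep, pvDfsA]
    rw [if_pos (by tauto)]

-- ---- flat/nested correspondence ----

theorem pvTrunc_length (colsN : Nat) (g : List (List String))
    (hs : ∀ row ∈ g, colsN ≤ row.length) :
    (pvTrunc colsN g).length = g.length * colsN := by
  induction g with
  | nil => simp [pvTrunc]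
  | cons r t ih =>
    have hr := hs r (by simp)
    have ht := ih (fun row hrow => hs row (by simp [hrow]))
    simp only [pvTrunc, List.map_cons, List.flatten_cons, List.length_append,
      List.length_take, List.length_cons, Nat.succ_mul] at ht ⊢
    rw [Nat.min_eq_left hr]
    omega

theorem pvTrunc_getD (colsN : Nat) (g : List (List String)) (x y : Nat)
    (hx : x < g.length) (hy : y < colsN)
    (hs : ∀ row ∈ g, colsN ≤ row.length) :
    (pvTrunc colsN g).getD (x * colsN + y) "" = (g.getD x []).getD y "" := by
  induction g generalizing x with
  | nil => simp at hx
  | cons r t ih =>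
    have hr := hs r (by simp)
    have hst : ∀ row ∈ t, colsN ≤ row.length := fun row hrow => hs row (by simp [hrow])
    cases x with
    | zero =>
      simp only [pvTrunc, List.map_cons, List.flatten_cons, Nat.zero_mul, Nat.zero_add,
        List.getD_cons_zero]
      have hlen : y < (r.take colsN).length := by
        rw [List.length_take, Nat.min_eq_left hr]; omega
      rw [List.getD_append _ _ _ _ hlen]
      simp [List.getD_eq_getElem?_getD, List.getElem?_take, hy]
    | succ x =>
      simp only [List.length_cons, Nat.succ_lt_succ_iff] at hx
      have := ih x hx hst
      simp only [pvTrunc, List.map_cons, List.flatten_cons, List.getD_cons_succ]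
      have harith : (x + 1) * colsN + y = (r.take colsN).length + (x * colsN + y) := by
        rw [List.length_take, Nat.min_eq_left hr]; ring
      rw [harith, List.getD_append_right _ _ _ _ (Nat.le_add_right _ _)]
      simpa using this

theorem pvTrunc_set (colsN : Nat) (g : List (List String)) (x y : Nat)
    (hx : x < g.length) (hy : y < colsN)
    (hs : ∀ row ∈ g, colsN ≤ row.length) :
    pvTrunc colsN (g.set x ((g.getD x []).set y "#"))
      = (pvTrunc colsN g).set (x * colsN + y) "#" := by
  induction g generalizing x with
  | nil => simp at hx
  | cons r t ih =>
    have hr := hs r (by simp)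
    have hst : ∀ row ∈ t, colsN ≤ row.length := fun row hrow => hs row (by simp [hrow])
    cases x with
    | zero =>
      simp only [List.set_cons_zero, List.getD_cons_zero, pvTrunc, List.map_cons,
        List.flatten_cons, Nat.zero_mul, Nat.zero_add]
      have hlen : y < (r.take colsN).length := by
        rw [List.length_take, Nat.min_eq_left hr]; omega
      rw [List.set_append_left _ _ hlen]
      congr 1
      apply List.ext_getElem
      · simp [List.length_take]
      · intro i h1 h2
        by_cases hiy : i = y
        · subst hiy
          simp [List.getElem_take, List.getElem_set, hy]
        · simp [List.getElem_take, List.getElem_set, hiy]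
    | succ x =>
      simp only [List.length_cons, Nat.succ_lt_succ_iff] at hx
      have := ih x hx hst
      simp only [List.set_cons_succ, List.getD_cons_succ, pvTrunc, List.map_cons,
        List.flatten_cons]
      have harith : (x + 1) * colsN + y = (r.take colsN).length + (x * colsN + y) := by
        rw [List.length_take, Nat.min_eq_left hr]; ring
      rw [harith, List.set_append_right _ _ (Nat.le_add_right _ _)]
      simp only [Nat.add_sub_cancel_left]
      simp only [pvTrunc] at this
      rw [this]

-- ---- the flood-fill simulation ----

theorem pvFoldl_guard_cons {rows cols : Int} (b : Prop) [Decidable b] (p : Int × Int)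
    (l : List (Int × Int)) (s : List (List String) × Int)
    (h : ¬b → pvStep rows cols s p = s) :
    (if b then p :: l else l).foldl (pvStep rows cols) s
      = l.foldl (pvStep rows cols) (pvStep rows cols s p) := by
  by_cases hb : b
  · rw [if_pos hb]; rfl
  · rw [if_neg hb, h hb]

theorem pvFlatLive_eq (cells : List String) : pvFlatLive cells = pvRowCount cells := rfl

theorem pvEncToNat {cols x y : Int} (hx0 : 0 ≤ x) (hy0 : 0 ≤ y) (hyc : y < cols) :
    (x * cols + y).toNat = x.toNat * cols.toNat + y.toNat := by
  have hc0 : 0 ≤ cols := le_trans hy0 (le_of_lt hyc)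
  have h1 : x * cols + y = ((x.toNat * cols.toNat + y.toNat : Nat) : Int) := by
    push_cast [Int.toNat_of_nonneg hx0, Int.toNat_of_nonneg hy0, Int.toNat_of_nonneg hc0]
    ring
  rw [h1, Int.toNat_natCast]

theorem pvCellBounds {rows cols : Int} {g : List (List String)} {x y : Int}
    (hs : pvShape rows cols g) (hx0 : 0 ≤ x) (hxr : x < rows) (hy0 : 0 ≤ y) (hyc : y < cols) :
    x.toNat < g.length ∧ y.toNat < cols.toNat ∧ cols.toNat ≤ (g.getD x.toNat []).length := by
  have h1 := hs.1
  have hxg : x.toNat < g.length := by omega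
  refine ⟨hxg, by omega, ?_⟩
  have hmem : g.getD x.toNat [] ∈ g := by
    rw [List.getD_eq_getElem g [] hxg]
    exact List.getElem_mem _
  have := hs.2 _ hmem
  omega

theorem pvTruncCell {rows cols : Int} {g : List (List String)} {x y : Int}
    (hs : pvShape rows cols g) (hx0 : 0 ≤ x) (hxr : x < rows) (hy0 : 0 ≤ y) (hyc : y < cols) :
    (pvTrunc cols.toNat g).getD (x * cols + y).toNat "" = pvCellD g x y := by
  obtain ⟨h1, h2, h3⟩ := pvCellBounds hs hx0 hxr hy0 hyc
  rw [pvEncToNat hx0 hy0 hyc,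
    pvTrunc_getD cols.toNat g x.toNat y.toNat h1 h2 (fun row hrow => by
      have := hs.2 row hrow; omega)]
  rfl

theorem pvFlatFlood_sim (rows cols : Int) (hc : 0 < cols) :
    ∀ (fuel : Nat) (g : List (List String)) (ps : List (Int × Int)) (c : Int),
      pvShape rows cols g →
      (∀ p ∈ ps, 0 ≤ p.1 ∧ p.1 < rows ∧ 0 ≤ p.2 ∧ p.2 < cols) →
      ps.length + 4 * pvRowCount (pvTrunc cols.toNat g) ≤ fuel →
      pvFloodFlat fuel cols (rows * cols) (pvTrunc cols.toNat g)
          (ps.map (fun p => p.1 * cols + p.2)) c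
        = (pvTrunc cols.toNat (ps.foldl (pvStep rows cols) (g, c)).1,
           (ps.foldl (pvStep rows cols) (g, c)).2) := by
  intro fuel
  induction fuel using Nat.strong_induction_on with
  | _ fuel ih =>
  intro g ps c hs hb hf
  match fuel, ps with
  | fuel, [] => cases fuel <;> rfl
  | 0, p :: rest => simp at hf
  | fuel + 1, ⟨x, y⟩ :: rest =>
    obtain ⟨hx0, hxr, hy0, hyc⟩ := hb _ (List.mem_cons_self ..)
    try dsimp only at hx0 hxr hy0 hyc
    have hbrest : ∀ p ∈ rest, 0 ≤ p.1 ∧ p.1 < rows ∧ 0 ≤ p.2 ∧ p.2 < cols :=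
      fun p hp => hb p (List.mem_cons_of_mem _ hp)
    have hget := pvTruncCell hs hx0 hxr hy0 hyc
    try dsimp only at hget
    have hmod : PySem.Int.mod (x * cols + y) cols = y := by
      rw [PySem.Int.mod_eq_emod_of_pos hc, mul_comm, add_comm,
        Int.add_mul_emod_self_left, Int.emod_eq_of_lt hy0 hyc]
    simp only [List.map_cons, pvFloodFlat, hget]
    by_cases hblocked : pvCellD g x y = "#"
    · rw [if_pos hblocked]
      have hstep0 : pvStep rows cols (g, c) (x, y) = (g, c) := by
        simp only [pvStep, pvDfsA]
        rw [if_pos (by tauto)]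
      simp only [List.foldl_cons, hstep0]
      exact ih fuel (by omega) g rest c hs hbrest (by simp only [List.length_cons] at hf; omega)
    · rw [if_neg hblocked]
      have hng : ¬(x < 0 ∨ rows ≤ x ∨ y < 0 ∨ cols ≤ y ∨ pvCellD g x y = "#") := by
        push Not
        exact ⟨hx0, hxr, hy0, hyc, hblocked⟩
      obtain ⟨hxg, hyN, hrowlen⟩ := pvCellBounds hs hx0 hxr hy0 hyc
      try dsimp only at hxg hyN hrowlen
      -- the marked grid / flat copy correspond
      have hsetflat : (pvTrunc cols.toNat g).set (x * cols + y).toNat "#"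
          = pvTrunc cols.toNat (pvSetCell g x y "#") := by
        rw [pvEncToNat hx0 hy0 hyc,
          ← pvTrunc_set cols.toNat g x.toNat y.toNat hxg hyN (fun row hrow => by
            have := hs.2 row hrow; omega)]
        rfl
      have hs1 : pvShape rows cols (pvSetCell g x y "#") := pvShape_set x y "#" hs
      have hlive : pvRowCount (pvTrunc cols.toNat (pvSetCell g x y "#")) + 1
          = pvRowCount (pvTrunc cols.toNat g) := by
        rw [← hsetflat]
        apply pvRowCount_set_eq
        · rw [pvTrunc_length cols.toNat g (fun row hrow => by have := hs.2 row hrow; omega),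
            pvEncToNat hx0 hy0 hyc]
          have e1 : (x.toNat + 1) * cols.toNat = x.toNat * cols.toNat + cols.toNat := by ring
          have e2 : (x.toNat + 1) * cols.toNat ≤ g.length * cols.toNat :=
            Nat.mul_le_mul_right _ (by omega)
          omega
        · rw [hget]; exact hblocked
      -- guard ↔ bounds facts
      have hg3 : (cols ≤ x * cols + y) ↔ (1 ≤ x) := by
        constructor
        · intro h
          by_contra hcon
          push Not at hcon
          have : x * cols ≤ 0 := mul_nonpos_iff.mpr (Or.inr ⟨by omega, by omega⟩)
          omega
        · intro h
          have : 1 * cols ≤ x * cols := mul_le_mul_of_nonneg_right h (by omega)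
          omega
      have hg4 : (x * cols + y + cols < rows * cols) ↔ (x + 1 < rows) := by
        constructor
        · intro h
          by_contra hcon
          push Not at hcon
          have : rows * cols ≤ (x + 1) * cols := mul_le_mul_of_nonneg_right hcon (by omega)
          nlinarith
        · intro h
          have : (x + 2) * cols ≤ rows * cols :=
            mul_le_mul_of_nonneg_right (by omega) (by omega)
          nlinarith
      -- the pushed stack, in pair form
      set q1 : List (Int × Int) := if 0 < y then (x, y - 1) :: rest else rest with hq1
      set q2 : List (Int × Int) := if y < cols - 1 then (x, y + 1) :: q1 else q1 with hq2
      set q3 : List (Int × Int) := if 1 ≤ x then (x - 1, y) :: q2 else q2 with hq3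
      set q4 : List (Int × Int) := if x + 1 < rows then (x + 1, y) :: q3 else q3 with hq4
      -- payload arithmetic: pair-encoded neighbour indices in k-form
      have e4 : (x + 1) * cols + y = x * cols + y + cols := by ring
      have e3 : (x - 1) * cols + y = x * cols + y - cols := by ring
      have e2 : x * cols + (y + 1) = x * cols + y + 1 := by ring
      have e1 : x * cols + (y - 1) = x * cols + y - 1 := by ring
      have hb1 : ∀ p ∈ q1, 0 ≤ p.1 ∧ p.1 < rows ∧ 0 ≤ p.2 ∧ p.2 < cols := by
        rw [hq1]; split_ifs with h
        · intro p hp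
          rcases List.mem_cons.mp hp with rfl | hp
          · exact ⟨by omega, by omega, by omega, by omega⟩
          · exact hbrest p hp
        · exact hbrest
      have hb2 : ∀ p ∈ q2, 0 ≤ p.1 ∧ p.1 < rows ∧ 0 ≤ p.2 ∧ p.2 < cols := by
        rw [hq2]; split_ifs with h
        · intro p hp
          rcases List.mem_cons.mp hp with rfl | hp
          · exact ⟨by omega, by omega, by omega, by omega⟩
          · exact hb1 p hp
        · exact hb1
      have hb3 : ∀ p ∈ q3, 0 ≤ p.1 ∧ p.1 < rows ∧ 0 ≤ p.2 ∧ p.2 < cols := by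
        rw [hq3]; split_ifs with h
        · intro p hp
          rcases List.mem_cons.mp hp with rfl | hp
          · exact ⟨by omega, by omega, by omega, by omega⟩
          · exact hb2 p hp
        · exact hb2
      have hq4b : ∀ p ∈ q4, 0 ≤ p.1 ∧ p.1 < rows ∧ 0 ≤ p.2 ∧ p.2 < cols := by
        rw [hq4]; split_ifs with h
        · intro p hp
          rcases List.mem_cons.mp hp with rfl | hp
          · exact ⟨by omega, by omega, by omega, by omega⟩
          · exact hb3 p hp
        · exact hb3
      have hq4len : q4.length ≤ rest.length + 4 := by
        rw [hq4, hq3, hq2, hq1]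
        split_ifs <;> simp <;> omega
      set c1 : Int := if pvCellD g x y = "D" then c + 1 else c with hc1
      have key := ih fuel (by omega) (pvSetCell g x y "#") q4 c1 hs1 hq4b
        (by simp only [List.length_cons] at hf; omega)
      simp only [hq4, hq3, hq2, hq1,
        apply_ite (List.map (fun p : Int × Int => p.1 * cols + p.2)), List.map_cons,
        e4, e3, e2, e1] at key
      rw [hsetflat]
      simp only [hmod, hg3, hg4]
      rw [key]
      have hfold : q4.foldl (pvStep rows cols) (pvSetCell g x y "#", c1)
          = ((x, y) :: rest).foldl (pvStep rows cols) (g, c) := by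
        rw [List.foldl_cons, pvStep_unfold rows cols g x y c hs, if_neg hng]
        rw [hq4, pvFoldl_guard_cons _ _ _ _
          (fun h4 => pvStep_oob _ (Or.inr (Or.inl (by omega))))]
        rw [hq3, pvFoldl_guard_cons _ _ _ _
          (fun h3 => pvStep_oob _ (Or.inl (by omega)))]
        rw [hq2, pvFoldl_guard_cons _ _ _ _
          (fun h2 => pvStep_oob _ (Or.inr (Or.inr (Or.inr (by omega)))))]
        rw [hq1, pvFoldl_guard_cons _ _ _ _
          (fun h1 => pvStep_oob _ (Or.inr (Or.inr (Or.inl (by omega)))))]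
      rw [hfold]
  

-- ---- the outer loop ----

theorem pvFoldl_flatMap {α β γ : Type} (l : List α) (m : α → List β) (f : γ → β → γ) (s : γ) :
    (l.flatMap m).foldl f s = l.foldl (fun s a => (m a).foldl f s) s := by
  induction l generalizing s with
  | nil => rfl
  | cons a t ih => simp [List.flatMap_cons, List.foldl_append, ih]

theorem pvRowTake (r : List String) (colsN : Nat) (hr : colsN ≤ r.length) :
    (List.range colsN).map (fun j => r.getD j "") = r.take colsN := by
  apply List.ext_getElem
  · simp [List.length_take]; omega
  · intro i h1 h2
    simp only [List.getElem_map, List.getElem_range, List.getElem_take]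
    rw [List.getD_eq_getElem r "" (by simp at h1; omega)]

theorem pvFlat_eq_trunc' (g : List (List String)) (colsN : Nat)
    (hs : ∀ row ∈ g, colsN ≤ row.length) :
    (List.range g.length).flatMap (fun i =>
        (List.range colsN).map (fun j => (g.getD i []).getD j ""))
      = pvTrunc colsN g := by
  induction g with
  | nil => simp [pvTrunc]
  | cons r t ih =>
    have hr := hs r (by simp)
    have ht := ih (fun row hrow => hs row (by simp [hrow]))
    rw [show (r :: t).length = t.length + 1 from rfl, List.range_succ_eq_map]
    simp only [List.flatMap_cons, List.getD_cons_zero, List.flatMap_map, Function.comp]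
    simp only [List.getD_cons_succ]
    rw [pvRowTake r colsN hr, ht]
    rfl

theorem pvFlat_eq_trunc (g : List (List String)) (colsN : Nat)
    (hs : ∀ row ∈ g, colsN ≤ row.length) :
    (PySem.List.pyRange 0 (g.length : Int) 1).flatMap (fun i =>
        (PySem.List.pyRange 0 (colsN : Int) 1).map (fun j =>
          (g.getD i.toNat []).getD j.toNat ""))
      = pvTrunc colsN g := by
  simp only [PySem.List.pyRange_one, Int.sub_zero, Int.toNat_natCast, zero_add,
    List.flatMap_map, List.map_map, Function.comp]
  exact pvFlat_eq_trunc' g colsN hs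

theorem pvRangeProd (r c : Nat) :
    PySem.List.pyRange 0 ((r : Int) * (c : Int)) 1
      = (PySem.List.pyRange 0 (r : Int) 1).flatMap (fun i =>
          (PySem.List.pyRange 0 (c : Int) 1).map (fun j => i * (c : Int) + j)) := by
  induction r with
  | zero => simp [PySem.List.pyRange_one_eq_nil]
  | succ r ih =>
    have h1 : ((r : Int) + 1) * (c : Int) = (r : Int) * c + c := by ring
    have h2 : PySem.List.pyRange 0 ((r : Int) * c + (c : Int)) 1
        = PySem.List.pyRange 0 ((r : Int) * c) 1
          ++ PySem.List.pyRange ((r : Int) * c) ((r : Int) * c + c) 1 :=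
      PySem.List.pyRange_one_append _ _ _ (by positivity) (by omega)
    have h3 : PySem.List.pyRange 0 ((r : Int) + 1) 1
        = PySem.List.pyRange 0 (r : Int) 1 ++ [(r : Int)] :=
      PySem.List.pyRange_one_succ_right (by positivity)
    have h4 : PySem.List.pyRange ((r : Int) * c) ((r : Int) * c + c) 1
        = (PySem.List.pyRange 0 (c : Int) 1).map (fun j => (r : Int) * c + j) := by
      rw [PySem.List.pyRange_one, PySem.List.pyRange_one]
      simp [List.map_map, Function.comp]
    push_cast
    rw [h1, h2, h3, List.flatMap_append, ih, h4]
    simp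

-- the loop bodies of the two outer folds, named for the simulation argument
def pvBodyA (rows cols : Int) (st : List (List String) × Int) (i j : Int) :
    List (List String) × Int :=
  if pvCellD st.1 i j = "." then
    ((pvDfsA (pvNonHash st.1 + 1) rows cols st.1 i j 0).1,
      max st.2 (pvDfsA (pvNonHash st.1 + 1) rows cols st.1 i j 0).2)
  else st

def pvBodyB (rows cols : Int) (st : List String × Int) (k : Int) : List String × Int :=
  if st.1.getD k.toNat "" = "." then
    ((pvFloodFlat (4 * pvFlatLive st.1 + 1) cols (rows * cols) st.1 [k] 0).1,
      max st.2 (pvFloodFlat (4 * pvFlatLive st.1 + 1) cols (rows * cols) st.1 [k] 0).2)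
  else st

theorem pvFoldl_inv {α β : Type} (Inv : α → Prop) (f : α → β → α)
    (hinv : ∀ a b, Inv a → Inv (f a b)) :
    ∀ (l : List β) (a : α), Inv a → Inv (l.foldl f a) := by
  intro l
  induction l with
  | nil => exact fun a h => h
  | cons b t ih => exact fun a h => ih _ (hinv a b h)

theorem pvFoldl_sim {σ τ π : Type} (F : σ → τ) (Inv : σ → Prop)
    (fA : σ → π → σ) (fB : τ → π → τ) :
    ∀ (l : List π), (∀ s p, p ∈ l → Inv s → fB (F s) p = F (fA s p)) →
      (∀ s p, p ∈ l → Inv s → Inv (fA s p)) →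
      ∀ s, Inv s → l.foldl fB (F s) = F (l.foldl fA s) := by
  intro l
  induction l with
  | nil => intro _ _ s _; rfl
  | cons p t ih =>
    intro hstep hinv s hs
    simp only [List.foldl_cons]
    rw [hstep s p (by simp) hs]
    exact ih (fun s q hq hI => hstep s q (by simp [hq]) hI)
      (fun s q hq hI => hinv s q (by simp [hq]) hI) _ (hinv s p (by simp) hs)

theorem pvBodyA_shape {rows cols : Int} (st : List (List String) × Int) (i j : Int)
    (hs : pvShape rows cols st.1) : pvShape rows cols (pvBodyA rows cols st i j).1 := by
  unfold pvBodyA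
  split
  · exact pvShape_dfsA _ _ _ _ hs
  · exact hs

theorem pvBody_sim (grid : List (List String)) (hpre : Pre_max_diamonds grid)
    (i j : Int) (hi0 : 0 ≤ i) (hir : i < (grid.length : Int))
    (hj0 : 0 ≤ j) (hjc : j < ((grid.headD []).length : Int))
    (s : List (List String) × Int)
    (hI : pvShape (grid.length : Int) ((grid.headD []).length : Int) s.1) :
    pvBodyB (grid.length : Int) ((grid.headD []).length : Int)
        ((pvTrunc (grid.headD []).length s.1, s.2)) (i * ((grid.headD []).length : Int) + j)
      = (pvTrunc (grid.headD []).length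
          (pvBodyA (grid.length : Int) ((grid.headD []).length : Int) s i j).1,
         (pvBodyA (grid.length : Int) ((grid.headD []).length : Int) s i j).2) := by
  have hc : (0 : Int) < ((grid.headD []).length : Int) := by omega
  have hget := pvTruncCell hI hi0 hir hj0 hjc
  rw [Int.toNat_natCast] at hget
  unfold pvBodyA pvBodyB
  simp only [hget]
  by_cases hdot : pvCellD s.1 i j = "."
  · rw [if_pos hdot, if_pos hdot]
    have hsim := pvFlatFlood_sim (grid.length : Int) ((grid.headD []).length : Int) hc
      (4 * pvFlatLive (pvTrunc (grid.headD []).length s.1) + 1) s.1 [(i, j)] 0 hI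
      (by
        intro p hp
        simp only [List.mem_singleton] at hp
        subst hp
        exact ⟨hi0, hir, hj0, hjc⟩)
      (by
        rw [pvFlatLive_eq, Int.toNat_natCast]
        simp only [List.length_cons, List.length_nil]
        omega)
    rw [Int.toNat_natCast] at hsim
    simp only [List.map_cons, List.map_nil, List.foldl_cons, List.foldl_nil, pvStep] at hsim
    rw [hsim]
  · rw [if_neg hdot, if_neg hdot]

theorem pvMainFold (grid : List (List String)) (hpre : Pre_max_diamonds grid) :
    ((PySem.List.pyRange 0 (grid.length : Int) 1).foldl (fun st i =>
        (PySem.List.pyRange 0 ((grid.headD []).length : Int) 1).foldl (fun st j =>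
          pvBodyA (grid.length : Int) ((grid.headD []).length : Int) st i j) st)
      ((grid, 0) : List (List String) × Int)).2
    = ((PySem.List.pyRange 0 (grid.length : Int) 1).foldl (fun st i =>
        (PySem.List.pyRange 0 ((grid.headD []).length : Int) 1).foldl (fun st j =>
          pvBodyB (grid.length : Int) ((grid.headD []).length : Int) st
            (i * ((grid.headD []).length : Int) + j)) st)
      ((pvTrunc (grid.headD []).length grid, 0) : List String × Int)).2 := by
  have hshape : pvShape (grid.length : Int) ((grid.headD []).length : Int) grid := by
    refine ⟨rfl, ?_⟩
    intro row hrow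
    exact_mod_cast hpre.2 row hrow
  have H := pvFoldl_sim
    (F := fun s : List (List String) × Int => ((pvTrunc (grid.headD []).length s.1, s.2) : List String × Int))
    (Inv := fun s : List (List String) × Int =>
      pvShape (grid.length : Int) ((grid.headD []).length : Int) s.1)
    (fA := fun st i =>
      (PySem.List.pyRange 0 ((grid.headD []).length : Int) 1).foldl (fun st j =>
        pvBodyA (grid.length : Int) ((grid.headD []).length : Int) st i j) st)
    (fB := fun st i =>
      (PySem.List.pyRange 0 ((grid.headD []).length : Int) 1).foldl (fun st j =>
        pvBodyB (grid.length : Int) ((grid.headD []).length : Int) st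
          (i * ((grid.headD []).length : Int) + j)) st)
    (PySem.List.pyRange 0 (grid.length : Int) 1)
    (by
      intro s i hi hI
      obtain ⟨hi0, hir⟩ := (PySem.List.mem_pyRange_one).mp hi
      exact pvFoldl_sim
        (F := fun s : List (List String) × Int =>
          ((pvTrunc (grid.headD []).length s.1, s.2) : List String × Int))
        (Inv := fun s : List (List String) × Int =>
          pvShape (grid.length : Int) ((grid.headD []).length : Int) s.1)
        (fA := fun st j =>
          pvBodyA (grid.length : Int) ((grid.headD []).length : Int) st i j)
        (fB := fun st j =>
          pvBodyB (grid.length : Int) ((grid.headD []).length : Int) st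
            (i * ((grid.headD []).length : Int) + j))
        (PySem.List.pyRange 0 ((grid.headD []).length : Int) 1)
        (fun s' j hj hI' =>
          pvBody_sim grid hpre i j hi0 hir
            ((PySem.List.mem_pyRange_one).mp hj).1 ((PySem.List.mem_pyRange_one).mp hj).2
            s' hI')
        (fun s' j _ hI' => pvBodyA_shape s' i j hI')
        s hI)
    (by
      intro s i hi hI
      exact pvFoldl_inv _ _ (fun a b h => pvBodyA_shape a i b h) _ s hI)
    ((grid, 0) : List (List String) × Int) hshape
  exact (congrArg Prod.snd H).symm

theorem pvMain (grid : List (List String)) (hpre : Pre_max_diamonds grid) :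
    max_diamonds grid = max_diamonds_alt grid := by
  simp only [max_diamonds, max_diamonds_alt]
  rw [pvFlat_eq_trunc grid (grid.headD []).length hpre.2,
    pvRangeProd grid.length (grid.headD []).length, pvFoldl_flatMap]
  simp only [List.foldl_map]
  exact pvMainFold grid hpre

-- ===== VERDICT (by name: the statement is the Claim_ definition above) =====
theorem max_diamonds_spec : Claim_equal_max_diamonds := by
  intro grid _ hpre
  unfold Spec_max_diamonds
  exact pvMain grid hpre
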